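-- pv_equiv track=rewrite | github.com/mrbartrns/algorithm-and-structure | programmers/lv4_review/p16.py | solution
-- ===== SOURCE A (Python) =====
-- class Node:
--     def __init__(self, a):
--         self.char = a
--         self.cnt = 0
--         self.next = []
--
-- def solution(words):
--     answer = 0
--     alphabets = [Node(chr(i + ord('a'))) for i in range(26)]
--     for word in words:
--         node = alphabets[ord(word[0]) - ord('a')]
--         dfs(node, 1, word)
--     for i in range(len(alphabets)):
--         answer += get_count(alphabets[i])
--     return answer
--
-- def dfs(node, idx, word):
--     node.cnt += 1
--
--     if idx == len(word):
--         return
--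
--     check = False
--     for next_node in node.next:
--         if next_node.char == word[idx]:
--             check = True
--             dfs(next_node, idx + 1, word)
--             break
--     if not check:
--         next_node = Node(word[idx])
--         node.next.append(next_node)
--         dfs(next_node, idx + 1, word)
--
-- def get_count(node):
--     answer = 0
--     answer += node.cnt
--     if node.cnt > 1:
--         for next_node in node.next:
--             answer += get_count(next_node)
--     return answer
-- ===== SOURCE B (Python) =====
-- def solution(words):
--     # Count every nonempty prefix of every word once, then a word's key
--     # presses are the first depth whose prefix is unique (or the full word
--     # length when no prefix ever becomes unique).  Sum over all words.
--     counts = {}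
--     for w in words:
--         for d in range(1, len(w) + 1):
--             p = w[:d]
--             counts[p] = counts.get(p, 0) + 1
--     total = 0
--     for w in words:
--         presses = len(w)
--         for d in range(1, len(w) + 1):
--             if counts[w[:d]] == 1:
--                 presses = d
--                 break
--         total += presses
--     return total
-- ===== Notes on version B (the rewrite author's own statement) =====
-- stated objective: simpler
-- what changed: B drops A's pointer trie (Node class, recursive insert dfs and aggregating get_count DFS) entirely: it counts every word prefix once in a plain dictionary and scores each word as the first depth whose prefix count is 1 (or its full length), summing the scores; Pre_ restricts to the problem's natural domain of nonempty words with a lowercase first letter, since elsewhere A either raises IndexError or silently files the word under another letter's bucket through negative list indexing.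
-- outside the precondition, e.g. on solution(['Ga', 'ab']): A returns 4, B returns 2
-- crash fix: On any input containing an empty word or a word whose first character is below 'G' or above 'z', A raises IndexError (word[0] or alphabets[ord(word[0])-97]); B returns the prefix-count total, e.g. 1 on ['3ab']. — e.g. on solution(["3ab"]): A raises IndexError, B returns 1
import Mathlib
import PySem

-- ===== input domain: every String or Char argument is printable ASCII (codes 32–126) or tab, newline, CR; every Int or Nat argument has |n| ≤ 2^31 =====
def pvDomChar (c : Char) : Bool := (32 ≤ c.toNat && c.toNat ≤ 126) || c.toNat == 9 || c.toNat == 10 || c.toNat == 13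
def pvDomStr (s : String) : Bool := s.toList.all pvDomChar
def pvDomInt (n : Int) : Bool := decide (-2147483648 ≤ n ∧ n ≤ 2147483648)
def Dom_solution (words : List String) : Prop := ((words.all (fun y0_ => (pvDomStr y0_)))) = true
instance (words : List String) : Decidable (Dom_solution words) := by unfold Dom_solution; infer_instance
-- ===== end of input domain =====

-- B replaces A's pointer trie (insert dfs + aggregating get_count DFS) by a prefix-count
-- dictionary and a per-word first-unique-depth scan; objective: a simpler, class-free algorithm.

-- ===== PORT A =====
-- Python's Node class: mutable node with char, cnt and a child list.
mutual
inductive PNode : Type where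
  | mk : Char → Int → PNodeList → PNode
inductive PNodeList : Type where
  | nil : PNodeList
  | cons : PNode → PNodeList → PNodeList
end

def PNode.char : PNode → Char
  | .mk c _ _ => c

-- dfs(node, idx, word): the (idx, word) pair is carried as the remaining suffix word[idx:];
-- the for-loop over node.next with its break is insertChildA.
mutual
def dfsA : PNode → List Char → PNode
  | .mk c k ch, [] => .mk c (k + 1) ch
  | .mk c k ch, x :: rest => .mk c (k + 1) (insertChildA ch x rest)
  termination_by n suf => (suf.length, sizeOf n)
  decreasing_by all_goals (simp_wf; omega)
def insertChildA : PNodeList → Char → List Char → PNodeList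
  | .nil, x, rest => .cons (dfsA (.mk x 0 .nil) rest) .nil
  | .cons n ns, x, rest =>
      if n.char = x then .cons (dfsA n rest) ns else .cons n (insertChildA ns x rest)
  termination_by ns _ rest => (rest.length + 1, sizeOf ns)
  decreasing_by all_goals (simp_wf; omega)
end

mutual
def getCount : PNode → Int
  | .mk _ k ch => k + (if 1 < k then getCountList ch else 0)
def getCountList : PNodeList → Int
  | .nil => 0
  | .cons n ns => getCount n + getCountList ns
end

def solution (words : List String) : Int :=
  let alphabets : List PNode :=
    (PySem.List.pyRange 0 26 1).map (fun i => PNode.mk (Char.ofNat (i + 97).toNat) 0 .nil)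
  let final : List PNode := words.foldl (fun alph word =>
    match PySem.Str.pyGet? word 0 with
    | none => alph            -- word[0]: IndexError on the empty word (excluded by Pre_)
    | some c =>
      let i : Int := (c.toNat : Int) - 97
      match PySem.List.pyGet? alph i with
      | none => alph          -- alphabets[i]: IndexError (excluded by Pre_)
      | some node => PySem.List.pySetD alph i (dfsA node (word.toList.drop 1))) alphabets
  (PySem.List.pyRange 0 (PySem.List.len final) 1).foldl
    (fun acc i => acc + getCount (PySem.List.pyGetD final i (PNode.mk 'a' 0 .nil))) 0

-- ===== PORT B =====
-- counts[p] = counts.get(p, 0) + 1 over every nonempty prefix p = w[:d] of every word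
def buildCounts (keys : List (List Char)) : PySem.Dict (List Char) Int :=
  keys.foldl (fun d k =>
    (List.range k.length).foldl
      (fun d i => d.insert (k.take (i + 1)) (d.getD (k.take (i + 1)) 0 + 1)) d)
    PySem.Dict.empty

-- the inner for-d loop with its break; reaching d > len(w) is the loop falling through,
-- leaving presses at its initial value len(w)
def scanGo (counts : PySem.Dict (List Char) Int) (k : List Char) (d : Nat) : Int :=
  if d ≤ k.length then
    (if counts.getD (k.take d) 0 = 1 then (d : Int) else scanGo counts k (d + 1))
  else (k.length : Int)
termination_by k.length + 1 - d

def solution_alt (words : List String) : Int :=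
  let keys := words.map (fun w => w.toList)
  let counts := buildCounts keys
  keys.foldl (fun acc k => acc + scanGo counts k 1) 0

-- ===== PRECONDITION & SPEC =====
-- Pre_ restricts to the problem's natural domain, nonempty words with a lowercase first
-- letter: elsewhere A either raises IndexError (empty word, or first letter below 'G' or
-- above 'z') or files the word under another letter's bucket via negative list indexing.
def Pre_solution (words : List String) : Prop :=
  ∀ w ∈ words, w.toList ≠ [] ∧ 97 ≤ (w.toList.headD 'a').toNat ∧ (w.toList.headD 'a').toNat ≤ 122
instance (words : List String) : Decidable (Pre_solution words) := by
  unfold Pre_solution; infer_instance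

def pvWitness_solution : List String := (["go", "gone", "guild"])

-- On any input containing an empty word or a word whose first character is below 'G' or
-- above 'z', A raises IndexError (word[0], or alphabets[ord(word[0])-97]); B returns the
-- prefix-count total there.
def Raises_solution (words : List String) : Prop :=
  ∃ w ∈ words, w.toList = [] ∨ (w.toList.headD 'a').toNat < 71 ∨ 122 < (w.toList.headD 'a').toNat
instance (words : List String) : Decidable (Raises_solution words) := by
  unfold Raises_solution; infer_instance

def pvRaiseWitness_solution : List String := (["3ab"])
def pvRaiseWitnessOut_solution : Int := 1

def Spec_solution (words : List String) (out : Int) : Prop := out = solution_alt words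
instance (words : List String) (out : Int) : Decidable (Spec_solution words out) := by
  unfold Spec_solution; infer_instance

-- ===== CLAIM (what is proved, stated in full; the proofs are below) =====
def Claim_equal_solution : Prop :=
  ∀ (words : List String), Dom_solution words → Pre_solution words →
    Spec_solution words (solution words)

def Claim_raises_solution : Prop :=
  (∀ (words : List String), Dom_solution words → Raises_solution words → ¬ Pre_solution words) ∧
  (Dom_solution (pvRaiseWitness_solution) ∧ Raises_solution (pvRaiseWitness_solution) ∧
    solution_alt (pvRaiseWitness_solution) = pvRaiseWitnessOut_solution)


-- ===== LEMMAS AND PROOFS =====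

-- proof-side vocabulary ---------------------------------------------------
def ofListN : List PNode → PNodeList
  | [] => .nil
  | n :: ns => .cons n (ofListN ns)

def tailsOf (x : Char) (ss : List (List Char)) : List (List Char) :=
  (ss.filter (fun s => s.head? == some x)).map List.tail

def headsDedup (ss : List (List Char)) : List Char :=
  PySem.List.dedup (ss.filterMap List.head?)

def insertAll (n : PNode) (ss : List (List Char)) : PNode := ss.foldl dfsA n

def msum (ss : List (List Char)) : Nat := (ss.map (fun s => s.length + 1)).sum

-- per-suffix press count inside the subtree holding sibling group ss
def fCount : List Char → List (List Char) → Int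
  | [], _ => 1
  | x :: r, ss => if 1 < ss.length then 1 + fCount r (tailsOf x ss) else 1

def share (p : List Char) (K : List (List Char)) : Nat :=
  K.countP (fun k => p.isPrefixOf k)

def nestedGroup (p : List Char) (K : List (List Char)) : List (List Char) :=
  (K.filter (fun k => p.isPrefixOf k)).map (fun k => k.drop p.length)

def prefixesOf (k : List Char) : List (List Char) :=
  (List.range k.length).map (fun i => k.take (i + 1))

def rootChar (r : Nat) : Char := Char.ofNat (r + 97)

def bucket (c : Char) : Nat := (PySem.Int.mod ((c.toNat : Int) - 97) 26).toNat

def rootsState (ks : List (List Char)) : List PNode :=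
  (List.range 26).map
    (fun r => insertAll (PNode.mk (rootChar r) 0 .nil) (tailsOf (rootChar r) ks))

-- the word-processing lambda of `solution`, named for the proofs
def stepA (alph : List PNode) (word : String) : List PNode :=
  match PySem.Str.pyGet? word 0 with
  | none => alph
  | some c =>
    let i : Int := (c.toNat : Int) - 97
    match PySem.List.pyGet? alph i with
    | none => alph
    | some node => PySem.List.pySetD alph i (dfsA node (word.toList.drop 1))


lemma sum_ite_single {cs : List Char} (hnd : cs.Nodup) {y : Char} (hy : y ∈ cs)
    (a : Int) (T : Char → Int) :
    (cs.map (fun x => if x = y then a + T x else T x)).sum = a + (cs.map T).sum := by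
  induction cs with
  | nil => cases hy
  | cons c cs ih =>
    rcases List.mem_cons.1 hy with h | h
    · have : ∀ x ∈ cs, (if x = y then a + T x else T x) = T x := by
        intro x hx
        have : x ≠ y := fun e => (List.nodup_cons.1 hnd).1 (h ▸ e ▸ hx)
        simp [this]
      simp [← h, List.map_congr_left this]
      ring
    · have hne : c ≠ y := fun e => (List.nodup_cons.1 hnd).1 (e ▸ h)
      simp [hne, ih (List.nodup_cons.1 hnd).2 h]
      ring

lemma tailsOf_cons (x : Char) (s : List Char) (ss : List (List Char)) :
    tailsOf x (s :: ss) =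
      if s.head? = some x then s.tail :: tailsOf x ss else tailsOf x ss := by
  by_cases h : s.head? = some x <;> simp [tailsOf, h]

theorem sum_buckets (cs : List Char) (hnd : cs.Nodup) (ss : List (List Char))
    (hcov : ∀ s ∈ ss, ∀ x, s.head? = some x → x ∈ cs) (g : Char → List Char → Int) :
    (cs.map (fun x => ((tailsOf x ss).map (g x)).sum)).sum =
      (ss.map (fun s => match s with | [] => 0 | x :: r => g x r)).sum := by
  induction ss with
  | nil => simp [tailsOf]
  | cons s ss ih =>
    have hcov' : ∀ s ∈ ss, ∀ x, s.head? = some x → x ∈ cs := by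
      intro t ht x hx; exact hcov t (List.mem_cons_of_mem _ ht) x hx
    cases s with
    | nil =>
      have he : ∀ x : Char, tailsOf x ([] :: ss) = tailsOf x ss := by
        intro x; rw [tailsOf_cons]; simp
      simp only [List.map_cons, List.sum_cons]
      simp only [he]
      rw [ih hcov']
      simp
    | cons y r =>
      have hy : y ∈ cs := hcov (y :: r) (List.mem_cons_self) y rfl
      have step : (cs.map (fun x => ((tailsOf x ((y :: r) :: ss)).map (g x)).sum)).sum
          = g y r + (cs.map (fun x => ((tailsOf x ss).map (g x)).sum)).sum := by
        rw [← sum_ite_single hnd hy (g y r) (fun x => ((tailsOf x ss).map (g x)).sum)]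
        congr 1
        apply List.map_congr_left
        intro x hx
        by_cases hxy : x = y
        · subst hxy; simp [tailsOf_cons]
        · simp [tailsOf_cons, hxy, Ne.symm hxy]
      rw [step, ih hcov']
      simp


lemma buildCounts_eq_counter (K : List (List Char)) :
    buildCounts K = PySem.Dict.counter (K.flatMap prefixesOf) := by
  rw [← PySem.Dict.foldl_insert_getD_add_one_eq_counter, List.foldl_flatMap]
  unfold buildCounts
  congr 1
  funext d k
  rw [prefixesOf, List.foldl_map]

lemma countP_range_take (k p : List Char) (hp : p ≠ []) :
    ∀ n, n ≤ k.length →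
      (List.range n).countP (fun i => k.take (i + 1) == p)
        = if p.length ≤ n ∧ k.take p.length = p then 1 else 0 := by
  intro n
  induction n with
  | zero =>
    intro _
    have : ¬ p.length ≤ 0 := by
      cases p with | nil => exact absurd rfl hp | cons a b => simp
    simp [this]
  | succ n ih =>
    intro hn
    rw [List.range_succ, List.countP_append]
    rw [ih (by omega)]
    by_cases he : k.take (n + 1) = p
    · have hlen : p.length = n + 1 := by
        rw [← he]; simp; omega
      have h1 : ¬ (p.length ≤ n ∧ k.take p.length = p) := fun ⟨h, _⟩ => by omega
      have h2 : (p.length ≤ n + 1 ∧ k.take p.length = p) := ⟨by omega, by rw [hlen, he]⟩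
      simp [h2, he]
      omega
    · have : (p.length ≤ n + 1 ∧ k.take p.length = p) ↔ (p.length ≤ n ∧ k.take p.length = p) := by
        constructor
        · rintro ⟨h1, h2⟩
          refine ⟨?_, h2⟩
          rcases Nat.lt_or_ge p.length (n + 1) with h | h
          · omega
          · exfalso; exact he (by rw [show p.length = n + 1 by omega] at h2; exact h2)
        · exact fun ⟨h1, h2⟩ => ⟨by omega, h2⟩
      simp [this, he]

lemma count_prefixesOf (k p : List Char) (hp : p ≠ []) :
    (prefixesOf k).count p = if p.isPrefixOf k then 1 else 0 := by
  rw [prefixesOf, List.count_eq_countP, List.countP_map]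
  have := countP_range_take k p hp k.length le_rfl
  have hiff : (p.length ≤ k.length ∧ k.take p.length = p) ↔ p.isPrefixOf k := by
    rw [List.isPrefixOf_iff_prefix, List.prefix_iff_eq_take]
    constructor
    · rintro ⟨h1, h2⟩; exact h2.symm
    · intro h
      refine ⟨?_, h.symm⟩
      have : p.length = min p.length k.length := by
        conv_lhs => rw [h]
        simp
      omega
  convert this using 2
  exact hiff.symm

lemma buildCounts_getD (K : List (List Char)) (p : List Char) (hp : p ≠ []) :
    (buildCounts K).getD p 0 = (share p K : Int) := by
  rw [buildCounts_eq_counter, PySem.Dict.getD_counter]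
  have : ∀ L : List (List Char), (L.flatMap prefixesOf).count p = share p L := by
    intro L
    induction L with
    | nil => simp [share]
    | cons k L ih =>
      rw [List.flatMap_cons, List.count_append, ih, count_prefixesOf k p hp]
      rw [share, share, List.countP_cons]
      by_cases h : p.isPrefixOf k <;> simp [h] <;> omega
  rw [this]


lemma length_nestedGroup (p : List Char) (K : List (List Char)) :
    (nestedGroup p K).length = share p K := by
  simp only [nestedGroup, List.length_map, share]
  rw [List.countP_eq_length_filter]

lemma prefix_snoc_iff (p : List Char) (x : Char) (k : List Char) :
    (p ++ [x]) <+: k ↔ p <+: k ∧ (k.drop p.length).head? = some x := by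
  constructor
  · rintro ⟨t, rfl⟩
    rw [List.append_assoc]
    refine ⟨⟨[x] ++ t, rfl⟩, ?_⟩
    rw [List.drop_left]
    rfl
  · rintro ⟨⟨r, rfl⟩, h⟩
    rw [List.drop_left] at h
    cases r with
    | nil => simp at h
    | cons y r' =>
      simp at h
      subst h
      exact ⟨r', by simp⟩

lemma nestedGroup_snoc (p : List Char) (x : Char) (K : List (List Char)) :
    nestedGroup (p ++ [x]) K = tailsOf x (nestedGroup p K) := by
  unfold nestedGroup tailsOf
  rw [List.filter_map, List.filter_filter, List.map_map]
  congr 1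
  · funext k
    simp [Function.comp, List.tail_drop]
  · apply List.filter_congr
    intro k _
    simp only [Function.comp]
    rw [Bool.eq_iff_iff]
    simp only [Bool.and_eq_true, beq_iff_eq, List.isPrefixOf_iff_prefix]
    exact (prefix_snoc_iff p x k).trans (by tauto)
lemma nestedGroup_single (c : Char) (K : List (List Char)) :
    nestedGroup [c] K = tailsOf c K := by
  unfold nestedGroup tailsOf
  congr 1
  · funext k
    simp [List.drop_one]
  · apply List.filter_congr
    intro k _
    rw [Bool.eq_iff_iff]
    simp only [beq_iff_eq, List.isPrefixOf_iff_prefix]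
    cases k with
    | nil => simp
    | cons y r => simp [List.cons_prefix_cons, eq_comm]

lemma fCount_one (t : List Char) (ss : List (List Char)) (h : ss.length ≤ 1) :
    fCount t ss = 1 := by
  cases t with
  | nil => rfl
  | cons x r => simp [fCount]; omega

theorem scanGo_eq (K : List (List Char)) (k : List Char) (hk : k ∈ K) :
    ∀ n d, k.length + 1 - d ≤ n → 1 ≤ d → d ≤ k.length →
      scanGo (buildCounts K) k d =
        ((d : Int) - 1) + fCount (k.drop d) (nestedGroup (k.take d) K) := by
  intro n
  induction n with
  | zero => intro d h h1 h2; omega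
  | succ n ih =>
    intro d h h1 h2
    have hne : k.take d ≠ [] := by
      intro he
      have hl : (k.take d).length = 0 := by rw [he]; rfl
      rw [List.length_take] at hl
      omega
    have hsh : 1 ≤ share (k.take d) K := by
      rw [share]
      apply List.countP_pos_iff.2
      exact ⟨k, hk, by simp [List.isPrefixOf_iff_prefix, List.take_prefix]⟩
    rw [scanGo, if_pos h2, buildCounts_getD K _ hne]
    by_cases hone : share (k.take d) K = 1
    · rw [if_pos (by exact_mod_cast hone)]
      rw [fCount_one _ _ (by rw [length_nestedGroup, hone])]
      ring
    · rw [if_neg (by exact_mod_cast hone)]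
      by_cases hd : d = k.length
      · subst hd
        rw [scanGo, if_neg (by omega)]
        rw [List.drop_length, fCount]
        ring
      · have hlt : d < k.length := by omega
        rw [ih (d + 1) (by omega) (by omega) (by omega)]
        have hdrop : k.drop d = k[d] :: k.drop (d + 1) := by
          exact List.drop_eq_getElem_cons hlt
        have htake : k.take (d + 1) = k.take d ++ [k[d]] := by
          rw [List.take_add_one, List.getElem?_eq_getElem hlt]
          rfl
        rw [hdrop, fCount, if_pos (by rw [length_nestedGroup]; omega)]
        rw [htake, nestedGroup_snoc]
        push_cast
        ring


-- basic facts ------------------------------------------------------------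
lemma char_dfsA (n : PNode) (s : List Char) : (dfsA n s).char = n.char := by
  cases n with
  | mk c k ch => cases s <;> rw [dfsA] <;> rfl

lemma char_insertAll (n : PNode) (ss : List (List Char)) :
    (insertAll n ss).char = n.char := by
  induction ss generalizing n with
  | nil => rfl
  | cons s ss ih => rw [insertAll, List.foldl_cons, ← insertAll, ih, char_dfsA]

lemma insertAll_snoc (n : PNode) (ss : List (List Char)) (s : List Char) :
    insertAll n (ss ++ [s]) = dfsA (insertAll n ss) s := by
  rw [insertAll, List.foldl_append, List.foldl_cons, List.foldl_nil]; rfl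

lemma dedup_snoc (l : List Char) (x : Char) :
    PySem.List.dedup (l ++ [x]) =
      if x ∈ l then PySem.List.dedup l else PySem.List.dedup l ++ [x] := by
  rw [PySem.List.dedup_eq_ofList, PySem.Set.ofList_append_singleton, PySem.Set.add_eq_ite]
  simp [PySem.Set.mem_ofList]

lemma mem_headsDedup (x : Char) (ss : List (List Char)) :
    x ∈ headsDedup ss ↔ ∃ s ∈ ss, s.head? = some x := by
  rw [headsDedup, PySem.List.dedup_eq_ofList]
  rw [PySem.Set.mem_ofList, List.mem_filterMap]

lemma nodup_headsDedup (ss : List (List Char)) : (headsDedup ss).Nodup := by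
  rw [headsDedup, PySem.List.dedup_eq_ofList]
  exact PySem.Set.nodup_ofList _

lemma headsDedup_snoc_nil (ss : List (List Char)) :
    headsDedup (ss ++ [([] : List Char)]) = headsDedup ss := by
  rw [headsDedup, headsDedup, List.filterMap_append]
  simp

lemma headsDedup_snoc_cons (ss : List (List Char)) (x : Char) (r : List Char) :
    headsDedup (ss ++ [x :: r]) =
      if x ∈ headsDedup ss then headsDedup ss else headsDedup ss ++ [x] := by
  rw [headsDedup, List.filterMap_append]
  have h1 : List.filterMap List.head? [x :: r] = [x] := rfl
  rw [h1, dedup_snoc]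
  have h2 : (x ∈ ss.filterMap List.head?) ↔ x ∈ headsDedup ss := by
    rw [headsDedup, PySem.List.mem_dedup]
  by_cases h : x ∈ headsDedup ss
  · rw [if_pos (h2.mpr h), if_pos h]; rfl
  · rw [if_neg (fun hh => h (h2.mp hh)), if_neg h]; rfl

lemma tailsOf_snoc (c : Char) (ss : List (List Char)) (s : List Char) :
    tailsOf c (ss ++ [s]) =
      tailsOf c ss ++ (if s.head? = some c then [s.tail] else []) := by
  rw [tailsOf, List.filter_append, List.map_append, tailsOf]
  by_cases h : s.head? = some c <;> simp [h]

lemma tailsOf_of_not_mem (x : Char) (ss : List (List Char))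
    (h : x ∉ headsDedup ss) : tailsOf x ss = [] := by
  rw [tailsOf, List.map_eq_nil_iff, List.filter_eq_nil_iff]
  intro s hs hbeq
  exact h ((mem_headsDedup x ss).2 ⟨s, hs, by simpa using hbeq⟩)

-- insertChildA on a list of child nodes with distinct chars ---------------
lemma insertChildA_ofListN (cs : List Char) (f : Char → PNode)
    (hf : ∀ c, (f c).char = c) (hnd : cs.Nodup) (x : Char) (rest : List Char) :
    insertChildA (ofListN (cs.map f)) x rest =
      ofListN (if x ∈ cs then
          cs.map (fun c => if c = x then dfsA (f c) rest else f c)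
        else cs.map f ++ [dfsA (.mk x 0 .nil) rest]) := by
  induction cs with
  | nil => simp [ofListN, insertChildA]
  | cons c cs ih =>
    simp only [List.map_cons, ofListN]
    rw [insertChildA]
    by_cases hcx : c = x
    · subst hcx
      rw [if_pos (hf c), if_pos (List.mem_cons_self)]
      simp only [ofListN]
      congr 1
      have : ∀ b ∈ cs, (if b = c then dfsA (f b) rest else f b) = f b := by
        intro b hb
        have : b ≠ c := fun e => (List.nodup_cons.1 hnd).1 (e ▸ hb)
        simp [this]
      rw [List.map_congr_left this]
    · rw [if_neg (by rw [hf c]; exact hcx)]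
      rw [ih (List.nodup_cons.1 hnd).2]
      by_cases hx : x ∈ cs
      · rw [if_pos hx, if_pos (List.mem_cons_of_mem _ hx)]
        simp [ofListN, Ne.symm, hcx]
      · have : x ∉ (c :: cs) := by
          intro hmem
          rcases List.mem_cons.1 hmem with h | h
          · exact hcx h.symm
          · exact hx h
        rw [if_neg hx, if_neg this]
        simp [ofListN]

theorem insertAll_shape (ss : List (List Char)) (c : Char) :
    insertAll (PNode.mk c 0 .nil) ss =
      PNode.mk c (ss.length : Int)
        (ofListN ((headsDedup ss).map
          (fun x => insertAll (PNode.mk x 0 .nil) (tailsOf x ss)))) := by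
  induction ss using List.reverseRecOn with
  | nil => simp [insertAll, headsDedup, ofListN, PySem.List.dedup]
  | append_singleton ss s ih =>
    rw [insertAll_snoc, ih]
    cases s with
    | nil =>
      rw [dfsA, headsDedup_snoc_nil]
      have ht : ∀ x, tailsOf x (ss ++ [([] : List Char)]) = tailsOf x ss := by
        intro x; rw [tailsOf_snoc]; simp
      simp only [ht]
      congr 1
      simp only [List.length_append, List.length_cons, List.length_nil]
      push_cast
      omega
    | cons y r =>
      rw [dfsA]
      rw [insertChildA_ofListN _ _ (fun x => char_insertAll _ _) (nodup_headsDedup ss)]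
      by_cases hy : y ∈ headsDedup ss
      · rw [if_pos hy, headsDedup_snoc_cons, if_pos hy]
        congr 1
        · simp only [List.length_append, List.length_cons, List.length_nil]; push_cast; omega
        · congr 1
          apply List.map_congr_left
          intro x hx
          by_cases hxy : x = y
          · subst hxy
            simp [tailsOf_snoc, insertAll_snoc]
          · rw [if_neg hxy, tailsOf_snoc, if_neg (by simp [Ne.symm hxy]), List.append_nil]
      · rw [if_neg hy, headsDedup_snoc_cons, if_neg hy]
        congr 1
        · simp only [List.length_append, List.length_cons, List.length_nil]; push_cast; omega
        · rw [List.map_append]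
          have h1 : List.map (fun x => insertAll (PNode.mk x 0 PNodeList.nil)
                (tailsOf x (ss ++ [y :: r]))) (headsDedup ss)
              = List.map (fun x => insertAll (PNode.mk x 0 PNodeList.nil)
                (tailsOf x ss)) (headsDedup ss) := by
            apply List.map_congr_left
            intro x hx
            rw [tailsOf_snoc, if_neg ?_, List.append_nil]
            simp only [List.head?_cons, Option.some.injEq]
            intro e; exact absurd (e ▸ hx) hy
          have h2 : List.map (fun x => insertAll (PNode.mk x 0 PNodeList.nil)
                (tailsOf x (ss ++ [y :: r]))) [y]
              = [dfsA (PNode.mk y 0 PNodeList.nil) r] := by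
            simp only [List.map_cons, List.map_nil]
            rw [tailsOf_snoc, tailsOf_of_not_mem y ss hy]
            simp [insertAll]
          rw [h1, h2]

lemma getCountList_ofListN (l : List PNode) :
    getCountList (ofListN l) = (l.map getCount).sum := by
  induction l with
  | nil => rfl
  | cons n ns ih => rw [ofListN, getCountList, ih]; simp

lemma tailsOf_cons' (x : Char) (s : List Char) (ss : List (List Char)) :
    tailsOf x (s :: ss) =
      if s.head? = some x then s.tail :: tailsOf x ss else tailsOf x ss := by
  by_cases h : s.head? = some x <;> simp [tailsOf, h]

lemma msum_tailsOf_le (x : Char) (ss : List (List Char)) :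
    msum (tailsOf x ss) ≤ msum ss := by
  induction ss with
  | nil => simp [tailsOf, msum]
  | cons s ss ih =>
    rw [tailsOf_cons']
    by_cases h : s.head? = some x
    · rw [if_pos h]
      have : s.tail.length + 1 ≤ s.length + 1 := by cases s <;> simp
      simp only [msum, List.map_cons, List.sum_cons] at *
      omega
    · rw [if_neg h]
      simp only [msum, List.map_cons, List.sum_cons] at *
      omega

lemma msum_tailsOf_lt (x : Char) (ss : List (List Char))
    (hx : x ∈ headsDedup ss) : msum (tailsOf x ss) < msum ss := by
  induction ss with
  | nil => rw [mem_headsDedup] at hx; simp at hx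
  | cons s ss ih =>
    rw [tailsOf_cons']
    by_cases h : s.head? = some x
    · rw [if_pos h]
      have hs : s.tail.length + 1 < s.length + 1 := by
        cases s with
        | nil => simp at h
        | cons a b => simp
      have := msum_tailsOf_le x ss
      simp only [msum, List.map_cons, List.sum_cons] at *
      omega
    · rw [if_neg h]
      have hx' : x ∈ headsDedup ss := by
        rw [mem_headsDedup] at hx ⊢
        rcases hx with ⟨t, ht, hh⟩
        rcases List.mem_cons.1 ht with rfl | ht'
        · exact absurd hh h
        · exact ⟨t, ht', hh⟩
      have := ih hx'
      simp only [msum, List.map_cons, List.sum_cons] at *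
      omega

lemma sum_map_one_add (g : List Char → Int) (ss : List (List Char)) :
    (ss.map (fun t => 1 + g t)).sum = (ss.length : Int) + (ss.map g).sum := by
  induction ss with
  | nil => simp
  | cons a b ih =>
    simp only [List.map_cons, List.sum_cons, List.length_cons, ih]
    push_cast
    ring

theorem getCount_insertAll (ss : List (List Char)) (c : Char) :
    getCount (insertAll (PNode.mk c 0 .nil) ss) =
      (ss.map (fun t => fCount t ss)).sum := by
  suffices h : ∀ N ss (c : Char), msum ss ≤ N →
      getCount (insertAll (PNode.mk c 0 .nil) ss) =
        (ss.map (fun t => fCount t ss)).sum from h (msum ss) ss c le_rfl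
  intro N
  induction N with
  | zero =>
    intro ss c h
    have : ss = [] := by
      cases ss with
      | nil => rfl
      | cons s ss => simp [msum] at h
    subst this
    rfl
  | succ N ih =>
    intro ss c h
    rw [insertAll_shape, getCount, getCountList_ofListN, List.map_map]
    by_cases hlen : 1 < ss.length
    · rw [if_pos (by exact_mod_cast hlen)]
      have hsum : ((headsDedup ss).map (getCount ∘ fun x =>
          insertAll (PNode.mk x 0 PNodeList.nil) (tailsOf x ss))).sum =
          ((headsDedup ss).map (fun x =>
            ((tailsOf x ss).map (fun t => fCount t (tailsOf x ss))).sum)).sum := by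
        apply congrArg
        apply List.map_congr_left
        intro x hx
        simp only [Function.comp]
        exact ih (tailsOf x ss) x (by have := msum_tailsOf_lt x ss hx; omega)
      rw [hsum]
      rw [sum_buckets (headsDedup ss) (nodup_headsDedup ss) ss
        (fun s hs x hx => (mem_headsDedup x ss).2 ⟨s, hs, hx⟩)
        (fun x r => fCount r (tailsOf x ss))]
      have hfc : ∀ t ∈ ss, fCount t ss =
          1 + (match t with | [] => 0 | x :: r => fCount r (tailsOf x ss)) := by
        intro t _
        cases t with
        | nil => simp [fCount]
        | cons x r => rw [fCount, if_pos hlen]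
      rw [List.map_congr_left hfc, sum_map_one_add]
    · rw [if_neg (by exact_mod_cast hlen)]
      have hfc : ∀ t ∈ ss, fCount t ss = 1 := fun t _ => fCount_one t ss (by omega)
      rw [List.map_congr_left hfc]
      cases ss with
      | nil => simp
      | cons a b =>
        cases b with
        | nil => simp
        | cons a2 b2 => simp at hlen

-- ===== assembly ==========================================================
lemma charOfNat_toNat (m : Nat) (h : m < 55296) : (Char.ofNat m).toNat = m := by
  simp [Char.toNat_ofNat, Nat.isValidChar, h]

lemma rootChar_inj {r s : Nat} (hr : r < 26) (hs : s < 26) (h : rootChar r = rootChar s) :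
    r = s := by
  have := congrArg Char.toNat h
  rw [rootChar, rootChar, charOfNat_toNat _ (by omega), charOfNat_toNat _ (by omega)] at this
  omega

lemma bucket_lt (c : Char) : bucket c < 26 := by
  have h1 := PySem.Int.mod_nonneg ((c.toNat : Int) - 97) (b := 26) (by norm_num)
  have h2 := PySem.Int.mod_lt ((c.toNat : Int) - 97) (b := 26) (by norm_num)
  rw [bucket]
  omega

lemma rootChar_bucket_lower (c : Char) (hlo : 97 ≤ c.toNat) (hhi : c.toNat ≤ 122) :
    rootChar (bucket c) = c := by
  have hm : PySem.Int.mod ((c.toNat : Int) - 97) 26 = (c.toNat : Int) - 97 := by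
    rw [PySem.Int.mod_eq_emod_of_pos (by norm_num)]
    omega
  have hb : bucket c = c.toNat - 97 := by
    rw [bucket, hm]; omega
  rw [rootChar, hb]
  have he : c.toNat - 97 + 97 = c.toNat := by omega
  rw [he]
  exact Char.ofNat_toNat c

lemma pyIdx?_of_band (i : Int) (h1 : -26 ≤ i) (h2 : i < 26) :
    PySem.List.pyIdx? 26 i = some ((PySem.Int.mod i 26).toNat) := by
  have hm : PySem.Int.mod i 26 = if 0 ≤ i then i else i + 26 := by
    rw [PySem.Int.mod_eq_emod_of_pos (by norm_num)]
    split_ifs with h <;> omega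
  by_cases h : 0 ≤ i
  · simp only [PySem.List.pyIdx?]
    rw [if_pos h, if_pos (by exact_mod_cast h2)]
    congr 1
    rw [hm, if_pos h]
  · simp only [PySem.List.pyIdx?]
    rw [if_neg h, if_pos (by push_cast; omega)]
    congr 1
    rw [hm, if_neg h]
    omega

lemma pyGet?_band {α : Type} (L : List α) (hL : L.length = 26) (i : Int)
    (h1 : -26 ≤ i) (h2 : i < 26) :
    PySem.List.pyGet? L i = L[(PySem.Int.mod i 26).toNat]? := by
  rw [PySem.List.pyGet?, hL, pyIdx?_of_band i h1 h2]
  rfl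

lemma pySetD_band {α : Type} (L : List α) (hL : L.length = 26) (i : Int)
    (h1 : -26 ≤ i) (h2 : i < 26) (v : α) :
    PySem.List.pySetD L i v = L.set ((PySem.Int.mod i 26).toNat) v := by
  rw [PySem.List.pySetD, PySem.List.pySet?, hL, pyIdx?_of_band i h1 h2]
  rfl

lemma length_rootsState (ks : List (List Char)) : (rootsState ks).length = 26 := by
  simp [rootsState]

lemma getElem?_rootsState (ks : List (List Char)) (n0 : Nat) (h : n0 < 26) :
    (rootsState ks)[n0]? =
      some (insertAll (PNode.mk (rootChar n0) 0 .nil) (tailsOf (rootChar n0) ks)) := by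
  simp [rootsState, h]

lemma rootsState_snoc (ks : List (List Char)) (n0 : Nat) (h : n0 < 26) (rest : List Char) :
    rootsState (ks ++ [rootChar n0 :: rest]) =
      (rootsState ks).set n0
        (dfsA (insertAll (PNode.mk (rootChar n0) 0 .nil) (tailsOf (rootChar n0) ks)) rest) := by
  apply List.ext_getElem (by simp [rootsState])
  intro j hj1 hj2
  have hj : j < 26 := by simpa [rootsState] using hj1
  rw [List.getElem_set]
  simp only [rootsState, List.getElem_map, List.getElem_range]
  by_cases hje : n0 = j
  · subst hje
    rw [if_pos rfl, tailsOf_snoc, if_pos (by simp), insertAll_snoc]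
    rfl
  · rw [if_neg hje, tailsOf_snoc, if_neg ?_, List.append_nil]
    simp only [List.head?_cons, Option.some.injEq]
    intro e
    exact hje (rootChar_inj h hj e)

lemma stepA_rootsState (ks : List (List Char)) (w : String)
    (hne : w.toList ≠ []) (hlo : 97 ≤ (w.toList.headD 'a').toNat)
    (hhi : (w.toList.headD 'a').toNat ≤ 122) :
    stepA (rootsState ks) w = rootsState (ks ++ [w.toList]) := by
  obtain ⟨c, rest, hw⟩ : ∃ c rest, w.toList = c :: rest := by
    cases hwl : w.toList with
    | nil => exact absurd hwl hne
    | cons a b => exact ⟨a, b, rfl⟩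
  rw [hw] at hlo hhi
  simp only [List.headD_cons] at hlo hhi
  have hget : PySem.Str.pyGet? w 0 = some c := by
    rw [PySem.Str.pyGet?, PySem.Chars.pyGet?_eq_listPyGet?, hw]
    exact PySem.List.pyGet?_zero_cons c rest
  have hband1 : (-26 : Int) ≤ (c.toNat : Int) - 97 := by omega
  have hband2 : ((c.toNat : Int) - 97) < 26 := by omega
  rw [stepA, hget]
  simp only
  rw [pyGet?_band _ (length_rootsState ks) _ hband1 hband2]
  rw [show ((PySem.Int.mod ((c.toNat : Int) - 97) 26).toNat) = bucket c from rfl]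
  rw [getElem?_rootsState ks _ (bucket_lt c)]
  simp only
  rw [pySetD_band _ (length_rootsState ks) _ hband1 hband2]
  rw [show ((PySem.Int.mod ((c.toNat : Int) - 97) 26).toNat) = bucket c from rfl]
  rw [hw]
  simp only [List.drop_succ_cons, List.drop_zero]
  have hc : rootChar (bucket c) = c := rootChar_bucket_lower c hlo hhi
  rw [show (c :: rest) = rootChar (bucket c) :: rest by rw [hc],
    rootsState_snoc ks (bucket c) (bucket_lt c) rest, hc]

lemma foldl_stepA (words : List String)
    (hpre : ∀ w ∈ words, w.toList ≠ [] ∧ 97 ≤ (w.toList.headD 'a').toNat ∧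
      (w.toList.headD 'a').toNat ≤ 122) :
    ∀ ks, words.foldl stepA (rootsState ks) = rootsState (ks ++ words.map (fun w => w.toList)) := by
  induction words with
  | nil => intro ks; simp
  | cons w ws ih =>
    intro ks
    obtain ⟨h1, h2, h3⟩ := hpre w (List.mem_cons_self)
    rw [List.foldl_cons, stepA_rootsState ks w h1 h2 h3,
      ih (fun v hv => hpre v (List.mem_cons_of_mem _ hv)) (ks ++ [w.toList])]
    simp

theorem solution_spec : Claim_equal_solution := by
  intro words hdom hpre
  rw [Spec_solution]
  have hpre' : ∀ w ∈ words, w.toList ≠ [] ∧ 97 ≤ (w.toList.headD 'a').toNat ∧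
      (w.toList.headD 'a').toNat ≤ 122 := hpre
  set K : List (List Char) := words.map (fun w => w.toList) with hK
  have hkey : ∀ k ∈ K, ∃ n0 rest, n0 < 26 ∧ k = rootChar n0 :: rest := by
    intro k hk
    rw [hK] at hk
    obtain ⟨w, hw, rfl⟩ := List.mem_map.1 hk
    obtain ⟨h1, h2, h3⟩ := hpre' w hw
    obtain ⟨c, rest, hwl⟩ : ∃ c rest, w.toList = c :: rest := by
      cases hwl : w.toList with
      | nil => exact absurd hwl h1
      | cons a b => exact ⟨a, b, rfl⟩
    rw [hwl] at h2 h3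
    simp only [List.headD_cons] at h2 h3
    exact ⟨bucket c, rest, bucket_lt c, by rw [hwl, rootChar_bucket_lower c h2 h3]⟩
  have hnd : ((List.range 26).map rootChar).Nodup := by
    apply List.Nodup.map_on ?_ (List.nodup_range)
    intro x hx y hy h
    exact rootChar_inj (List.mem_range.1 hx) (List.mem_range.1 hy) h
  have hcov : ∀ s ∈ K, ∀ x, s.head? = some x → x ∈ (List.range 26).map rootChar := by
    intro sIn hs x hx
    obtain ⟨n0, rest, hn0, rfl⟩ := hkey sIn hs
    simp only [List.head?_cons, Option.some.injEq] at hx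
    exact List.mem_map.2 ⟨n0, List.mem_range.2 hn0, hx⟩
  -- A's value
  have hA : solution words = (K.map
      (fun k => match k with
        | [] => (0 : Int)
        | x :: r => fCount r (tailsOf x K))).sum := by
    have e1 : solution words =
        (PySem.List.pyRange 0
          (PySem.List.len (words.foldl stepA (rootsState []))) 1).foldl
          (fun acc i => acc + getCount (PySem.List.pyGetD
            (words.foldl stepA (rootsState [])) i (PNode.mk 'a' 0 .nil))) 0 := rfl
    rw [e1, foldl_stepA words hpre' []]
    simp only [List.nil_append, ← hK]
    have e3 := PySem.List.foldl_pyRange_pyGetD (rootsState K) (PNode.mk 'a' 0 .nil)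
      (fun acc v => acc + getCount v) 0 (a := 0) (le_refl (0 : Int))
    rw [e3]
    simp only [Int.toNat_zero, List.drop_zero]
    rw [PySem.List.foldl_add]
    simp only [zero_add]
    rw [rootsState, List.map_map]
    have e2 : (List.range 26).map (getCount ∘ fun r =>
          insertAll (PNode.mk (rootChar r) 0 .nil) (tailsOf (rootChar r) K))
        = (List.range 26).map ((fun x =>
            ((tailsOf x K).map (fun t => fCount t (tailsOf x K))).sum) ∘ rootChar) := by
      apply List.map_congr_left
      intro r hr
      simp only [Function.comp]
      exact getCount_insertAll _ _
    rw [e2, ← List.map_map]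
    rw [sum_buckets ((List.range 26).map rootChar) hnd K hcov
      (fun x r => fCount r (tailsOf x K))]
  -- B's value
  have hB : solution_alt words = (K.map
      (fun k => match k with
        | [] => (0 : Int)
        | x :: r => fCount r (tailsOf x K))).sum := by
    have e1 : solution_alt words =
        K.foldl (fun acc k => acc + scanGo (buildCounts K) k 1) 0 := rfl
    rw [e1, PySem.List.foldl_add]
    simp only [zero_add]
    apply congrArg
    apply List.map_congr_left
    intro k hk
    obtain ⟨n0, rest, hn0, rfl⟩ := hkey k hk
    have h1 : 1 ≤ (rootChar n0 :: rest).length := by simp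
    rw [scanGo_eq K _ hk (rootChar n0 :: rest).length 1 (by omega) le_rfl h1]
    show (1 : Int) - 1 + fCount ((rootChar n0 :: rest).drop 1)
        (nestedGroup ((rootChar n0 :: rest).take 1) K)
      = fCount rest (tailsOf (rootChar n0) K)
    simp only [List.drop_succ_cons, List.drop_zero, List.take_succ_cons, List.take_zero]
    rw [nestedGroup_single]
    ring
  rw [hA, hB]

theorem solution_raises : Claim_raises_solution := by
  unfold Claim_raises_solution
  constructor
  · intro words _ hr hpre
    obtain ⟨w, hw, hcase⟩ := hr
    obtain ⟨h1, h2, h3⟩ := hpre w hw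
    rcases hcase with h | h | h
    · exact h1 h
    · omega
    · omega
  · refine ⟨by decide, by decide, ?_⟩
    show solution_alt ["3ab"] = 1
    have hs : ("3ab" : String).toList = ['3', 'a', 'b'] := rfl
    unfold solution_alt
    simp only [List.map_cons, List.map_nil, hs, List.foldl_cons, List.foldl_nil]
    rw [scanGo]
    norm_num
    decide

-- self-check: the raise witness lies inside Raises_ and Dom_ (components of solution_raises)
theorem solution_raises_witness_ok :
    Dom_solution pvRaiseWitness_solution ∧ Raises_solution pvRaiseWitness_solution :=
  ⟨solution_raises.2.1, solution_raises.2.2.1⟩
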